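-- pv_equiv track=rewrite | github.com/TracyChacon/solving_problems | 2025_10_28_navigator.py | navigate
-- ===== SOURCE A (Python) =====
-- def navigate(commands: list[str]) -> str:
--     back_history = ['Home']
--     forward_history = []
--     current_page = ''
--
--     for command in commands:
--         tokens = command.split(' ', 1)
--         action = tokens[0].lower()
--
--         if action =='visit' and len(tokens) > 1:
--             current_page = tokens[1]
--             back_history.append(current_page)
--             forward_history = []
--         elif action == 'back' and len(back_history) > 1:
--             new_forward_page = back_history.pop()
--             forward_history.append(new_forward_page)
--         elif action == 'forward' and len(forward_history) > 0:
--             new_back_page = forward_history.pop()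
--             back_history.append(new_back_page)
--
--     current_page = back_history[-1]
--
--     return current_page
-- ===== SOURCE B (Python) =====
-- def navigate(commands: list[str]) -> str:
--     # Two stages: first compile the raw commands into abstract ops, then run a
--     # cursor-over-one-list browser model with clamped arithmetic (no guards).
--     def parse(command):
--         tokens = command.split(' ', 1)
--         action = tokens[0].lower()
--         if action == 'visit' and len(tokens) > 1:
--             return ('visit', tokens[1])
--         if action == 'back':
--             return ('back', None)
--         if action == 'forward':
--             return ('forward', None)
--         return ('noop', None)
--
--     ops = [parse(c) for c in commands]
--     history = ['Home']
--     pos = 0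
--     for kind, arg in ops:
--         if kind == 'visit':
--             del history[pos + 1:]
--             history.append(arg)
--             pos += 1
--         elif kind == 'back':
--             pos = max(pos - 1, 0)
--         elif kind == 'forward':
--             pos = min(pos + 1, len(history) - 1)
--     return history[pos]
-- ===== Notes on version B (the rewrite author's own statement) =====
-- stated objective: alternative
-- what changed: Replaces A's guarded two-stack simulation by a two-stage design: commands are first compiled into abstract ops, then a single history list with an integer cursor is folded over them, using clamped arithmetic (max/min) instead of conditional guards.
import Mathlib
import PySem

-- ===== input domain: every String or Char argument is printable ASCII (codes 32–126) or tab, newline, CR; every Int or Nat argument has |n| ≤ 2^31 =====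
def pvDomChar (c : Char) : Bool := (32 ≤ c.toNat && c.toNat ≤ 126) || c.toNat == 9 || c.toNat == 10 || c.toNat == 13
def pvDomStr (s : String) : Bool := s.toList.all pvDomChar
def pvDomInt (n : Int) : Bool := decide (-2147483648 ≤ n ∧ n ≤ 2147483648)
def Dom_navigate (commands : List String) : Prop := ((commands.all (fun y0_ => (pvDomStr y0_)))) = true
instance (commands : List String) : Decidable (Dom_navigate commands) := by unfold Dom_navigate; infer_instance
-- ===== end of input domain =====

-- B first compiles the commands into abstract ops, then runs a one-list cursor model
-- with clamped arithmetic, instead of A's guarded two-stack simulation ('alternative').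

-- ===== PORT A =====
-- tokens = command.split(' ', 1); sep ≠ "" so splitMax? is always `some`, .getD [] never fires
def pvTokens (command : String) : List String :=
  (PySem.Str.splitMax? command " " 1).getD []

-- action = tokens[0].lower(); tokens[0] always exists (split with nonempty sep), headD is exact
def pvAction (command : String) : String :=
  PySem.Str.lower ((pvTokens command).headD "")

-- one iteration of A's loop over state (back_history, forward_history, current_page)
def pvStepA (st : List String × List String × String) (command : String) :
    List String × List String × String :=
  if pvAction command = "visit" ∧ (pvTokens command).length > 1 then
    (st.1 ++ [(pvTokens command).getD 1 ""], [], (pvTokens command).getD 1 "")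
  else if pvAction command = "back" ∧ st.1.length > 1 then
    -- back_history.pop(): guard makes the stack nonempty, getLastD/dropLast are exact
    (st.1.dropLast, st.2.1 ++ [st.1.getLastD ""], st.2.2)
  else if pvAction command = "forward" ∧ st.2.1.length > 0 then
    (st.1 ++ [st.2.1.getLastD ""], st.2.1.dropLast, st.2.2)
  else st

def navigate (commands : List String) : String :=
  let st := commands.foldl pvStepA (["Home"], [], "")
  -- back_history[-1]: back_history is never empty, so the [-1] index is exact
  st.1.getLastD ""

-- ===== PORT B =====
-- the abstract op a command compiles to
inductive PvOp where
  | visit (page : String)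
  | back
  | forward
  | noop
deriving DecidableEq, Repr

-- parse(command): tokens / action computed as in Source B, then classified
def pvParse (command : String) : PvOp :=
  let tokens := (PySem.Str.splitMax? command " " 1).getD []
  let action := PySem.Str.lower (tokens.headD "")
  if action = "visit" ∧ tokens.length > 1 then .visit (tokens.getD 1 "")
  else if action = "back" then .back
  else if action = "forward" then .forward
  else .noop

-- one iteration of B's loop over state (history, pos); pos ≥ 0 always, so Nat is exact:
-- max(pos-1, 0) is Nat subtraction, min(pos+1, len-1) is Nat min (len ≥ 1 throughout)
def pvStepB (st : List String × Nat) (op : PvOp) : List String × Nat :=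
  match op with
  | .visit page => (st.1.take (st.2 + 1) ++ [page], st.2 + 1)
  | .back => (st.1, st.2 - 1)
  | .forward => (st.1, min (st.2 + 1) (st.1.length - 1))
  | .noop => st

def navigate_alt (commands : List String) : String :=
  -- ops = [parse(c) for c in commands], then the cursor fold
  let st := (commands.map pvParse).foldl pvStepB (["Home"], 0)
  -- history[pos]: the loop keeps pos < len(history), so the index is exact
  st.1.getD st.2 ""

-- ===== PRECONDITION & SPEC =====
def Spec_navigate (commands : List String) (out : String) : Prop := out = navigate_alt commands
instance (commands : List String) (out : String) : Decidable (Spec_navigate commands out) := by unfold Spec_navigate; infer_instance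

-- ===== CLAIM (what is proved, stated in full; the proofs are below) =====
def Claim_equal_navigate : Prop := ∀ (commands : List String), Dom_navigate commands → Spec_navigate commands (navigate commands)

-- ===== LEMMAS AND PROOFS =====

-- The coupling invariant: A's back stack is history up to the cursor, A's forward
-- stack is the rest of history reversed, and the cursor is in range.
def pvInv (a : List String × List String × String) (b : List String × Nat) : Prop :=
  a.1 = b.1.take (b.2 + 1) ∧ a.2.1 = (b.1.drop (b.2 + 1)).reverse ∧ b.2 < b.1.length

theorem pvInv_init : pvInv (["Home"], [], "") (["Home"], 0) := by
  simp [pvInv]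

theorem pvInv_step (a : List String × List String × String) (b : List String × Nat)
    (h : pvInv a b) (c : String) : pvInv (pvStepA a c) (pvStepB b (pvParse c)) := by
  obtain ⟨hback, hfwd, hpos⟩ := h
  have hlen : (b.1.take (b.2 + 1)).length = b.2 + 1 := by simp; omega
  have hlenA : a.1.length = b.2 + 1 := by rw [hback]; exact hlen
  have hflen : a.2.1.length = b.1.length - (b.2 + 1) := by rw [hfwd]; simp
  unfold pvStepA pvParse
  by_cases hv : pvAction c = "visit" ∧ (pvTokens c).length > 1
  · have hv' : PySem.Str.lower (((PySem.Str.splitMax? c " " 1).getD []).headD "") = "visit" ∧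
        ((PySem.Str.splitMax? c " " 1).getD []).length > 1 := hv
    rw [if_pos hv]
    simp only [if_pos hv', pvStepB]
    refine ⟨?_, ?_, ?_⟩ <;> dsimp only
    · have ht : List.take (b.2 + 1 + 1) (List.take (b.2 + 1) b.1 ++ [((PySem.Str.splitMax? c " " 1).getD []).getD 1 ""]) =
          List.take (b.2 + 1) b.1 ++ [((PySem.Str.splitMax? c " " 1).getD []).getD 1 ""] :=
        List.take_of_length_le (by simp [hlen])
      rw [ht, hback]; rfl
    · rw [List.drop_of_length_le (by simp [hlen])]
      simp
    · simp [hlen]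
  · have hv' : ¬ (PySem.Str.lower (((PySem.Str.splitMax? c " " 1).getD []).headD "") = "visit" ∧
        ((PySem.Str.splitMax? c " " 1).getD []).length > 1) := hv
    rw [if_neg hv]
    simp only [if_neg hv']
    by_cases hbk : pvAction c = "back"
    · -- parse gives .back; A's branch additionally needs len(back) > 1, i.e. pos > 0
      have hbk' : PySem.Str.lower (((PySem.Str.splitMax? c " " 1).getD []).headD "") = "back" := hbk
      simp only [if_pos hbk', pvStepB]
      by_cases hp : b.2 > 0
      · rw [if_pos ⟨hbk, by omega⟩]
        refine ⟨?_, ?_, ?_⟩ <;> dsimp only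
        · rw [hback, List.dropLast_eq_take, hlen, List.take_take]
          congr 1
          omega
        · have hlast : a.1.getLastD "" = b.1[b.2]'hpos := by
            rw [hback, List.getLastD_eq_getLast?, List.getLast?_eq_getElem?, hlen]
            simp [hpos]
          have hd : List.drop b.2 b.1 = b.1[b.2]'hpos :: List.drop (b.2 + 1) b.1 :=
            List.drop_eq_getElem_cons hpos
          rw [hfwd, hlast, show b.2 - 1 + 1 = b.2 from by omega, hd, List.reverse_cons]
        · omega
      · -- pos = 0: A's guard fails (back stack is a singleton), B's clamp keeps pos = 0
        rw [if_neg (by rintro ⟨-, h2⟩; omega)]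
        rw [if_neg (by rintro ⟨h1, -⟩
                       have : pvAction c = "back" := hbk
                       simp [this] at h1)]
        have h0 : b.2 - 1 = b.2 := by omega
        rw [h0]
        exact ⟨hback, hfwd, hpos⟩
    · have hbk' : ¬ PySem.Str.lower (((PySem.Str.splitMax? c " " 1).getD []).headD "") = "back" := hbk
      rw [if_neg (by rintro ⟨h1, -⟩; exact hbk h1)]
      simp only [if_neg hbk']
      by_cases hfw : pvAction c = "forward"
      · have hfw' : PySem.Str.lower (((PySem.Str.splitMax? c " " 1).getD []).headD "") = "forward" := hfw
        simp only [if_pos hfw', pvStepB]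
        by_cases hp : b.2 + 1 < b.1.length
        · rw [if_pos ⟨hfw, by omega⟩]
          have hmin : min (b.2 + 1) (b.1.length - 1) = b.2 + 1 := by omega
          rw [hmin]
          refine ⟨?_, ?_, ?_⟩ <;> dsimp only
          · have hlastf : a.2.1.getLastD "" = b.1[b.2 + 1]'hp := by
              rw [hfwd]
              simp [List.getLastD_eq_getLast?, List.getLast?_reverse, List.head?_drop,
                List.getElem?_eq_getElem hp]
            have ht : List.take (b.2 + 1 + 1) b.1 = List.take (b.2 + 1) b.1 ++ [b.1[b.2 + 1]'hp] := by
              rw [List.take_add_one]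
              simp [List.getElem?_eq_getElem hp]
            rw [hback, hlastf, ht]
          · have hd : List.drop (b.2 + 1) b.1 = b.1[b.2 + 1]'hp :: List.drop (b.2 + 1 + 1) b.1 :=
              List.drop_eq_getElem_cons hp
            rw [hfwd, hd]
            simp
          · omega
        · -- forward stack empty: A's guard fails, B's clamp keeps pos = len - 1 = pos
          rw [if_neg (by rintro ⟨-, h2⟩; omega)]
          have hmin : min (b.2 + 1) (b.1.length - 1) = b.2 := by omega
          rw [hmin]
          exact ⟨hback, hfwd, hpos⟩
      · have hfw' : ¬ PySem.Str.lower (((PySem.Str.splitMax? c " " 1).getD []).headD "") = "forward" := hfw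
        rw [if_neg (by rintro ⟨h1, -⟩; exact hfw h1)]
        simp only [if_neg hfw', pvStepB]
        exact ⟨hback, hfwd, hpos⟩

theorem pvInv_foldl (commands : List String) (a : List String × List String × String)
    (b : List String × Nat) (h : pvInv a b) :
    pvInv (commands.foldl pvStepA a) ((commands.map pvParse).foldl pvStepB b) := by
  induction commands generalizing a b with
  | nil => exact h
  | cons c cs ih =>
    simp only [List.foldl_cons, List.map_cons]
    exact ih _ _ (pvInv_step a b h c)

theorem pvInv_result (a : List String × List String × String) (b : List String × Nat)
    (h : pvInv a b) : a.1.getLastD "" = b.1.getD b.2 "" := by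
  obtain ⟨hback, -, hpos⟩ := h
  have hlen : (b.1.take (b.2 + 1)).length = b.2 + 1 := by
    simp; omega
  rw [hback, List.getLastD_eq_getLast?, List.getLast?_eq_getElem?, hlen]
  simp [hpos, List.getD]

-- ===== VERDICT (by name: the statement is the Claim_ definition above) =====
theorem navigate_spec : Claim_equal_navigate := by
  intro commands _
  unfold Spec_navigate navigate navigate_alt
  exact pvInv_result _ _ (pvInv_foldl commands _ _ pvInv_init)
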